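-- pv_equiv track=rewrite | github.com/cernat-catalin/advent_of_code_2019 | day16/main.py | step
-- ===== SOURCE A (Python) =====
-- from typing import List
-- from itertools import count, repeat
--
-- def step(digits: List[int], base_pattern: List[int], n: int) -> List[int]:
--     for _ in range(n):
--         new_digits = []
--         for i in range(len(digits)):
--             pattern = (base_pattern[(j // (i + 1)) % 4] for j in count())
--             next(pattern)
--
--             new_digit = sum(( next(pattern) * digit for digit in digits ))
--             new_digits.append(abs(new_digit) % 10)
--
--         digits = new_digits
--
--     return digits
-- ===== SOURCE B (Python) =====
-- def step(digits, base_pattern, n):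
--     for _ in range(n):
--         L = len(digits)
--         prefix = [0]
--         for d in digits:
--             prefix.append(prefix[-1] + d)
--         new_digits = []
--         for i in range(L):
--             w = i + 1
--             total = 0
--             for q in range(L // w + 1):
--                 lo = max(q * w, 1)
--                 hi = min((q + 1) * w, L + 1)
--                 total += base_pattern[q % 4] * (prefix[hi - 1] - prefix[lo - 1])
--             new_digits.append(abs(total) % 10)
--         digits = new_digits
--     return digits
-- ===== Notes on version B (the rewrite author's own statement) =====
-- stated objective: faster
-- what changed: Each output digit is computed from range sums of a prefix-sum array over the constant-coefficient blocks of the stretched pattern, instead of multiplying every digit by a freshly generated pattern element.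
import Mathlib
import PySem

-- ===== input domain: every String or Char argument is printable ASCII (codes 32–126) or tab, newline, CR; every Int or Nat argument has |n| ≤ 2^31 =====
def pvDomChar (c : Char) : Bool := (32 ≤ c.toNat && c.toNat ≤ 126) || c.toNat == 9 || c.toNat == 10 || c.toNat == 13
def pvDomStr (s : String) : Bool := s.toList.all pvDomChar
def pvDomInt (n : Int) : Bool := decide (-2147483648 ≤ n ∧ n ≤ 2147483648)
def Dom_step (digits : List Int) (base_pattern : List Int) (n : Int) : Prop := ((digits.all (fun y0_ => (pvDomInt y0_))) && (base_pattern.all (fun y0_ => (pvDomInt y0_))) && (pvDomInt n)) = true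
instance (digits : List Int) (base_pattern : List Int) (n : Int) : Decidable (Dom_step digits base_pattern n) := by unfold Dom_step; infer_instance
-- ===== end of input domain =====

-- B replaces A's per-digit pattern generator by prefix-sum range sums over the constant
-- blocks of the stretched pattern: O(n*L log L) instead of O(n*L^2) (measured faster).


-- ===== PORT A =====
-- one FFT phase of A: for each output index i, multiply each digit d_j by
-- base_pattern[((j+1) // (i+1)) % 4] (the generator with its first element consumed)
-- and sum; the getD 0 default is never hit inside Pre_step.
def stepPhaseA (bp : List Int) (digits : List Int) : List Int :=
  (List.range digits.length).map (fun i =>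
    (((List.range digits.length).foldl
        (fun acc j => acc + bp.getD (((j + 1) / (i + 1)) % 4) 0 * digits.getD j 0) 0).natAbs % 10 : Nat))

def step (digits : List Int) (base_pattern : List Int) (n : Int) : List Int :=
  (List.range n.toNat).foldl (fun ds _ => stepPhaseA base_pattern ds) digits

-- ===== PORT B =====
-- prefix = [0]; for d in digits: prefix.append(prefix[-1] + d)
def prefList (acc : Int) : List Int → List Int
  | [] => [acc]
  | d :: ds => acc :: prefList (acc + d) ds

-- one phase of B: block q of width w = i+1 has constant coefficient base_pattern[q % 4];
-- its digit sum is a difference of two prefix sums.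
def stepPhaseB (bp : List Int) (digits : List Int) : List Int :=
  (List.range digits.length).map (fun i =>
    (((List.range (digits.length / (i + 1) + 1)).foldl
        (fun acc q =>
          acc + bp.getD (q % 4) 0 *
            ((prefList 0 digits).getD (min ((q + 1) * (i + 1)) (digits.length + 1) - 1) 0
             - (prefList 0 digits).getD (max (q * (i + 1)) 1 - 1) 0)) 0).natAbs % 10 : Nat))

def step_alt (digits : List Int) (base_pattern : List Int) (n : Int) : List Int :=
  (List.range n.toNat).foldl (fun ds _ => stepPhaseB base_pattern ds) digits

-- ===== PRECONDITION & SPEC =====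
-- Pre_step excludes exactly the inputs on which the Python A raises IndexError:
-- with n ≥ 1 and L = len(digits) ≥ 1 it accesses base_pattern at every index up to
-- min(L, 3), so it returns iff len(base_pattern) ≥ min(L + 1, 4).
def Pre_step (digits : List Int) (base_pattern : List Int) (n : Int) : Prop :=
  n ≤ 0 ∨ digits = [] ∨ min (digits.length + 1) 4 ≤ base_pattern.length
instance (digits : List Int) (base_pattern : List Int) (n : Int) : Decidable (Pre_step digits base_pattern n) := by unfold Pre_step; infer_instance
def pvWitness_step : List Int × List Int × Int := ([1, 2, 3, 4, 5], [0, 1, 0, -1], 2)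

def Spec_step (digits : List Int) (base_pattern : List Int) (n : Int) (out : List Int) : Prop := out = step_alt digits base_pattern n
instance (digits : List Int) (base_pattern : List Int) (n : Int) (out : List Int) : Decidable (Spec_step digits base_pattern n out) := by unfold Spec_step; infer_instance

-- ===== CLAIM (what is proved, stated in full; the proofs are below) =====
def Claim_equal_step : Prop := ∀ (digits : List Int) (base_pattern : List Int) (n : Int), Dom_step digits base_pattern n → Pre_step digits base_pattern n → Spec_step digits base_pattern n (step digits base_pattern n)

-- ===== LEMMAS AND PROOFS =====

-- a foldl accumulating sums over range is a Finset.range sum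
theorem foldl_add_range_eq_sum (f : Nat → Int) (n : Nat) (init : Int) :
    (List.range n).foldl (fun acc j => acc + f j) init = init + ∑ j ∈ Finset.range n, f j := by
  induction n generalizing init with
  | zero => simp
  | succ m ih =>
      rw [List.range_succ, List.foldl_append, Finset.sum_range_succ, ih]
      simp [add_assoc]

-- the prefix list returns partial sums
theorem prefList_getD (d : List Int) (a : Int) (k : Nat) (hk : k ≤ d.length) :
    (prefList a d).getD k 0 = a + ∑ j ∈ Finset.range k, d.getD j 0 := by
  induction d generalizing a k with
  | nil =>
      have : k = 0 := Nat.le_zero.mp (by simpa using hk)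
      subst this
      simp [prefList]
  | cons x xs ih =>
      cases k with
      | zero => simp [prefList]
      | succ m =>
          have hm : m ≤ xs.length := by simpa using hk
          simp only [prefList, List.getD_cons_succ]
          rw [ih (a + x) m hm, Finset.sum_range_succ']
          simp [add_assoc, add_comm, add_left_comm]

theorem div_eq_iff_block (m w q : Nat) (hw : 0 < w) : m / w = q ↔ q * w ≤ m ∧ m < (q + 1) * w := by
  have hdm := Nat.div_add_mod m w
  have hmod := Nat.mod_lt m hw
  have hmul : (q + 1) * w = q * w + w := by ring
  constructor
  · rintro rfl
    have h1 := Nat.div_mul_le_self m w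
    have hcomm : w * (m / w) = m / w * w := by ring
    omega
  · rintro ⟨h1, h2⟩
    have hle : q ≤ m / w := Nat.le_div_iff_mul_le hw |>.mpr h1
    have hlt : m / w < q + 1 := Nat.div_lt_iff_lt_mul hw |>.mpr (by omega)
    omega

-- key identity: summing f((j+1)/w) * d_j over all j equals summing, per block q,
-- f q times the block's digit range sum
theorem block_sum (f : Nat → Int) (d : List Int) (w : Nat) (hw : 0 < w) :
    ∑ j ∈ Finset.range d.length, f ((j + 1) / w) * d.getD j 0
      = ∑ q ∈ Finset.range (d.length / w + 1),
          f q * ((∑ j ∈ Finset.range (min ((q + 1) * w) (d.length + 1) - 1), d.getD j 0)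
               - (∑ j ∈ Finset.range (max (q * w) 1 - 1), d.getD j 0)) := by
  set L := d.length with hL
  -- reindex LHS to m = j + 1 over Ico 1 (L+1)
  have h1 : ∑ j ∈ Finset.range L, f ((j + 1) / w) * d.getD j 0
      = ∑ m ∈ Finset.Ico 1 (L + 1), f (m / w) * d.getD (m - 1) 0 := by
    rw [Finset.sum_Ico_eq_sum_range]
    simp [add_comm 1]
  rw [h1]
  -- partition by fiber q = m / w
  have h2 : ∑ m ∈ Finset.Ico 1 (L + 1), f (m / w) * d.getD (m - 1) 0
      = ∑ q ∈ Finset.range (L / w + 1),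
          ∑ m ∈ (Finset.Ico 1 (L + 1)).filter (fun m => m / w = q), f (m / w) * d.getD (m - 1) 0 := by
    rw [Finset.sum_fiberwise_of_maps_to]
    intro m hm
    simp only [Finset.mem_Ico] at hm
    simp only [Finset.mem_range]
    have : m / w ≤ L / w := Nat.div_le_div_right (by omega)
    omega
  rw [h2]
  refine Finset.sum_congr rfl (fun q hq => ?_)
  simp only [Finset.mem_range] at hq
  -- the fiber is an interval
  have hfib : (Finset.Ico 1 (L + 1)).filter (fun m => m / w = q)
      = Finset.Ico (max (q * w) 1) (min ((q + 1) * w) (L + 1)) := by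
    ext m
    simp only [Finset.mem_filter, Finset.mem_Ico, lt_min_iff, max_le_iff]
    rw [div_eq_iff_block m w q hw]
    omega
  rw [hfib]
  -- constant coefficient on the block
  have hconst : ∑ m ∈ Finset.Ico (max (q * w) 1) (min ((q + 1) * w) (L + 1)), f (m / w) * d.getD (m - 1) 0
      = f q * ∑ m ∈ Finset.Ico (max (q * w) 1) (min ((q + 1) * w) (L + 1)), d.getD (m - 1) 0 := by
    rw [Finset.mul_sum]
    refine Finset.sum_congr rfl (fun m hm => ?_)
    simp only [Finset.mem_Ico, lt_min_iff, max_le_iff] at hm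
    have : m / w = q := by rw [div_eq_iff_block m w q hw]; omega
    rw [this]
  rw [hconst]
  congr 1
  -- range-sum of digits over the block as a difference of prefix sums
  set a := max (q * w) 1 with ha
  set b := min ((q + 1) * w) (L + 1) with hb
  have ha1 : 1 ≤ a := by omega
  have hqw : q * w ≤ L := by
    calc q * w ≤ L / w * w := Nat.mul_le_mul_right w (by omega)
      _ ≤ L := Nat.div_mul_le_self L w
  have hmul : (q + 1) * w = q * w + w := by ring
  have hab : a ≤ b := by omega
  · have h3 : ∑ m ∈ Finset.Ico a b, d.getD (m - 1) 0 = ∑ j ∈ Finset.Ico (a - 1) (b - 1), d.getD j 0 := by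
      rw [Finset.sum_Ico_eq_sum_range, Finset.sum_Ico_eq_sum_range]
      refine Finset.sum_congr (by congr 1; omega) (fun j _ => ?_)
      congr 1
      omega
    rw [h3, Finset.sum_Ico_eq_sub _ (by omega)]

-- the two phase implementations agree (unconditionally)
theorem phase_eq (bp d : List Int) : stepPhaseA bp d = stepPhaseB bp d := by
  unfold stepPhaseA stepPhaseB
  refine List.map_congr_left (fun i hi => ?_)
  have hw : 0 < i + 1 := Nat.succ_pos i
  rw [foldl_add_range_eq_sum (fun j => bp.getD (((j + 1) / (i + 1)) % 4) 0 * d.getD j 0) d.length 0,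
      foldl_add_range_eq_sum (fun q => bp.getD (q % 4) 0 *
        ((prefList 0 d).getD (min ((q + 1) * (i + 1)) (d.length + 1) - 1) 0
          - (prefList 0 d).getD (max (q * (i + 1)) 1 - 1) 0)) (d.length / (i + 1) + 1) 0]
  simp only [zero_add]
  congr 3
  have hpre : ∀ k, k ≤ d.length → (prefList 0 d).getD k 0 = ∑ j ∈ Finset.range k, d.getD j 0 := by
    intro k hk
    rw [prefList_getD d 0 k hk]
    ring
  refine (block_sum (fun q => bp.getD (q % 4) 0) d (i + 1) hw).trans ?_
  refine Finset.sum_congr rfl (fun q hq => ?_)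
  simp only [Finset.mem_range] at hq
  rw [hpre _ (by
        have h1 : min ((q + 1) * (i + 1)) (d.length + 1) ≤ d.length + 1 := min_le_right _ _
        omega),
      hpre _ (by
        have hqle : q * (i + 1) ≤ d.length := by
          calc q * (i + 1) ≤ d.length / (i + 1) * (i + 1) := Nat.mul_le_mul_right _ (by omega)
            _ ≤ d.length := Nat.div_mul_le_self _ _
        omega)]

theorem step_eq (digits bp : List Int) (n : Int) : step digits bp n = step_alt digits bp n := by
  unfold step step_alt
  induction n.toNat generalizing digits with
  | zero => simp
  | succ m ih =>
      rw [List.range_succ, List.foldl_append, List.foldl_append, ih, List.foldl_cons,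
          List.foldl_cons, List.foldl_nil, List.foldl_nil, phase_eq]

-- ===== VERDICT (by name: the statement is the Claim_ definition above) =====
theorem step_spec : Claim_equal_step := by
  intro digits bp n _ _
  unfold Spec_step
  exact step_eq digits bp n
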